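-- pv_equiv track=rewrite | github.com/pypi-data/pypi-mirror-402 | packages/terraback/terraback-0.5.0.tar.gz/terraback-0.5.0/terraback/cli/azure/common/utils.py | normalize_resource_id
-- ===== SOURCE A (Python) =====
-- def normalize_resource_id(resource_id: str) -> str:
--     """
--     Normalize an Azure resource ID to have consistent casing.
--
--     Azure resource IDs should have consistent casing for:
--     - /subscriptions/ (lowercase)
--     - /resourceGroups/ (camelCase)
--     - /providers/Microsoft.XXX (PascalCase for provider name)
--     - Resource type segments like dnsZones (camelCase)
--
--     Args:
--         resource_id: The Azure resource ID to normalize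
--
--     Returns:
--         A normalized resource ID with consistent casing
--     """
--     if not resource_id:
--         return resource_id
--
--     # Split the ID into segments
--     segments = resource_id.split('/')
--     normalized_segments = []
--
--     for i, segment in enumerate(segments):
--         if i == 0:  # Empty string before leading /
--             normalized_segments.append(segment)
--         elif i == 1 and segment.lower() == 'subscriptions':
--             normalized_segments.append('subscriptions')
--         elif i == 3 and segment.lower() == 'resourcegroups':
--             normalized_segments.append('resourceGroups')
--         elif i == 5 and segment.lower() == 'providers':
--             normalized_segments.append('providers')
--         elif i == 6 and segment.lower().startswith('microsoft.'):
--             # Provider name should be PascalCase (e.g., Microsoft.Network)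
--             parts = segment.split('.')
--             if len(parts) >= 2:
--                 parts[0] = 'Microsoft'
--                 # Special case for ManagedIdentity (camelCase in the second part)
--                 if parts[1].lower() == 'managedidentity':
--                     parts[1] = 'ManagedIdentity'
--                 else:
--                     # Capitalize first letter of each service name part
--                     for j in range(1, len(parts)):
--                         if parts[j]:
--                             parts[j] = parts[j][0].upper() + parts[j][1:].lower()
--                 normalized_segments.append('.'.join(parts))
--             else:
--                 normalized_segments.append(segment)
--         elif i > 6 and i % 2 == 1:  # Resource type segments (odd positions after provider)
--             # Common resource types that should be camelCase
--             resource_type_map = {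
--                 'dnszones': 'dnsZones',
--                 'virtualnetworks': 'virtualNetworks',
--                 'virtualmachines': 'virtualMachines',
--                 'storageaccounts': 'storageAccounts',
--                 'networkinterfaces': 'networkInterfaces',
--                 'publicipaddresses': 'publicIPAddresses',
--                 'networksecuritygroups': 'networkSecurityGroups',
--                 'loadbalancers': 'loadBalancers',
--                 'applicationgateways': 'applicationGateways',
--                 'userassignedidentities': 'userAssignedIdentities',
--                 'actiongroups': 'actionGroups',
--                 'loganalyticsworkspaces': 'logAnalyticsWorkspaces',
--                 'serverfarms': 'serverFarms',
--                 'sites': 'sites',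
--                 'vaults': 'vaults',
--             }
--             normalized_segments.append(resource_type_map.get(segment.lower(), segment))
--         else:
--             # Keep resource names and other segments as-is
--             normalized_segments.append(segment)
--
--     return '/'.join(normalized_segments)
-- ===== SOURCE B (Python) =====
-- _M = {
--     'dnszones': 'dnsZones',
--     'virtualnetworks': 'virtualNetworks',
--     'virtualmachines': 'virtualMachines',
--     'storageaccounts': 'storageAccounts',
--     'networkinterfaces': 'networkInterfaces',
--     'publicipaddresses': 'publicIPAddresses',
--     'networksecuritygroups': 'networkSecurityGroups',
--     'loadbalancers': 'loadBalancers',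
--     'applicationgateways': 'applicationGateways',
--     'userassignedidentities': 'userAssignedIdentities',
--     'actiongroups': 'actionGroups',
--     'loganalyticsworkspaces': 'logAnalyticsWorkspaces',
--     'serverfarms': 'serverFarms',
--     'sites': 'sites',
--     'vaults': 'vaults',
-- }
--
--
-- def _cap(p):
--     return p[0].upper() + p[1:].lower() if p else p
--
--
-- def _provider(seg):
--     parts = seg.split('.')
--     if len(parts) < 2:
--         return seg
--     rest = parts[1:]
--     if rest[0].lower() == 'managedidentity':
--         rest = ['ManagedIdentity'] + rest[1:]
--     else:
--         rest = [_cap(p) for p in rest]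
--     return '.'.join(['Microsoft'] + rest)
--
--
-- def _kw(word):
--     lw = word.lower()
--     return lambda s: word if s.lower() == lw else s
--
--
-- # function table for the seven fixed head positions; zip truncates on short IDs
-- _HEAD_FIXERS = [
--     lambda s: s,
--     _kw('subscriptions'),
--     lambda s: s,
--     _kw('resourceGroups'),
--     lambda s: s,
--     _kw('providers'),
--     lambda s: _provider(s) if s.lower().startswith('microsoft.') else s,
-- ]
--
--
-- def _pairs(rest):
--     # after the provider segment the ID alternates type/name: consume two at a time
--     if not rest:
--         return []
--     t = _M.get(rest[0].lower(), rest[0])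
--     if len(rest) == 1:
--         return [t]
--     return [t, rest[1]] + _pairs(rest[2:])
--
--
-- def normalize_resource_id(resource_id: str) -> str:
--     if not resource_id:
--         return resource_id
--     segs = resource_id.split('/')
--     head = [f(s) for f, s in zip(_HEAD_FIXERS, segs)]
--     return '/'.join(head + _pairs(segs[7:]))
-- ===== Notes on version B (the rewrite author's own statement) =====
-- stated objective: alternative
-- what changed: Replaces A's single enumerate loop with index-keyed elif branches by a function table zipped against the seven fixed head positions plus a pairwise (type,name) recursion that consumes the tail two segments at a time, with no indices or parity tests.
import Mathlib
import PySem

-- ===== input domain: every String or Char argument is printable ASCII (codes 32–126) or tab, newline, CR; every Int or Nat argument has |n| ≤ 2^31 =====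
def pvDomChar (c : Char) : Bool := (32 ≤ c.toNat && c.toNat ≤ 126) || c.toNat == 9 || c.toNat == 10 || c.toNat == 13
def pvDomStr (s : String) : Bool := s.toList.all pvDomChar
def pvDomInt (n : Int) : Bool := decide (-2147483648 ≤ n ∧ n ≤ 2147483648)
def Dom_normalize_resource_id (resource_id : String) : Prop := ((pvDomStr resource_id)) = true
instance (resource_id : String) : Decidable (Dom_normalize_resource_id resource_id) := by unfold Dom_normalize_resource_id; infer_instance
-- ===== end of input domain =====

-- B replaces A's single enumerate loop with index-keyed elif branches by a function table
-- zipped against the head segments plus a pairwise (type,name) recursion over the tail;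
-- objective 'alternative' (same cost).

-- shared data: the resource-type table both Python sources carry literally
def pvRtMap : PySem.Dict (List Char) (List Char) := PySem.Dict.ofList [
  ("dnszones".toList, "dnsZones".toList),
  ("virtualnetworks".toList, "virtualNetworks".toList),
  ("virtualmachines".toList, "virtualMachines".toList),
  ("storageaccounts".toList, "storageAccounts".toList),
  ("networkinterfaces".toList, "networkInterfaces".toList),
  ("publicipaddresses".toList, "publicIPAddresses".toList),
  ("networksecuritygroups".toList, "networkSecurityGroups".toList),
  ("loadbalancers".toList, "loadBalancers".toList),
  ("applicationgateways".toList, "applicationGateways".toList),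
  ("userassignedidentities".toList, "userAssignedIdentities".toList),
  ("actiongroups".toList, "actionGroups".toList),
  ("loganalyticsworkspaces".toList, "logAnalyticsWorkspaces".toList),
  ("serverfarms".toList, "serverFarms".toList),
  ("sites".toList, "sites".toList),
  ("vaults".toList, "vaults".toList)]

-- p[0].upper() + p[1:].lower()  (both Pythons evaluate this only on nonempty p; [] case unreachable)
def pvCapFirst (p : List Char) : List Char :=
  match p with
  | [] => []
  | c :: rest => PySem.Chars.upperChar c :: PySem.Chars.lower rest

-- ===== PORT A =====
-- the body of A's enumerate loop: one normalized segment from (index, segment)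
def pvSegA (i : Int) (segment : List Char) : List Char :=
  if i = 0 then segment
  else if i = 1 ∧ PySem.Chars.lower segment = "subscriptions".toList then "subscriptions".toList
  else if i = 3 ∧ PySem.Chars.lower segment = "resourcegroups".toList then "resourceGroups".toList
  else if i = 5 ∧ PySem.Chars.lower segment = "providers".toList then "providers".toList
  else if i = 6 ∧ PySem.Chars.startswith (PySem.Chars.lower segment) ("microsoft.".toList) then
    let parts := PySem.Chars.splitOn segment ['.']
    if 2 ≤ parts.length then
      let parts := parts.set 0 ("Microsoft".toList)
      if PySem.Chars.lower (PySem.List.pyGetD parts 1 []) = "managedidentity".toList then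
        PySem.Chars.join ['.'] (parts.set 1 ("ManagedIdentity".toList))
      else
        -- for j in range(1, len(parts)): if parts[j]: parts[j] = parts[j][0].upper() + parts[j][1:].lower()
        PySem.Chars.join ['.'] ((PySem.List.pyRange 1 parts.length 1).foldl
          (fun ps j => if PySem.List.pyGetD ps j [] ≠ [] then
              ps.set j.toNat (pvCapFirst (PySem.List.pyGetD ps j [])) else ps) parts)
    else segment
  else if 6 < i ∧ PySem.Int.mod i 2 = 1 then pvRtMap.getD (PySem.Chars.lower segment) segment
  else segment

def normalize_resource_id (resource_id : String) : String :=
  if resource_id = "" then resource_id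
  else
    let segments := PySem.Chars.splitOn resource_id.toList ['/']
    let normalized_segments := (PySem.List.enumerate segments).foldl
      (fun acc p => acc ++ [pvSegA p.1 p.2]) []
    String.mk (PySem.Chars.join ['/'] normalized_segments)

-- ===== PORT B =====
-- _provider(seg)
def pvProviderB (seg : List Char) : List Char :=
  let parts := PySem.Chars.splitOn seg ['.']
  if parts.length < 2 then seg
  else
    let rest := PySem.List.slice parts (some 1) none
    let rest :=
      if PySem.Chars.lower (PySem.List.pyGetD rest 0 []) = "managedidentity".toList then
        "ManagedIdentity".toList :: PySem.List.slice rest (some 1) none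
      else
        rest.map (fun p => if p = [] then p else pvCapFirst p)
    PySem.Chars.join ['.'] ("Microsoft".toList :: rest)

-- _kw(word)
def pvKw (word : List Char) (s : List Char) : List Char :=
  if PySem.Chars.lower s = PySem.Chars.lower word then word else s

-- _HEAD_FIXERS: the function table for the seven fixed head positions
def pvHeadFixers : List (List Char → List Char) :=
  [fun s => s,
   pvKw ("subscriptions".toList),
   fun s => s,
   pvKw ("resourceGroups".toList),
   fun s => s,
   pvKw ("providers".toList),
   fun s => if PySem.Chars.startswith (PySem.Chars.lower s) ("microsoft.".toList)
            then pvProviderB s else s]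

-- _pairs(rest): pairwise (type, name) recursion over the tail
def pvPairs : List (List Char) → List (List Char)
  | [] => []
  | [t] => [pvRtMap.getD (PySem.Chars.lower t) t]
  | t :: n :: rest => pvRtMap.getD (PySem.Chars.lower t) t :: n :: pvPairs rest

def normalize_resource_id_alt (resource_id : String) : String :=
  if resource_id = "" then resource_id
  else
    let segs := PySem.Chars.splitOn resource_id.toList ['/']
    let head := List.zipWith (fun f s => f s) pvHeadFixers segs
    String.mk (PySem.Chars.join ['/'] (head ++ pvPairs (PySem.List.slice segs (some 7) none)))

-- ===== PRECONDITION & SPEC =====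
def Spec_normalize_resource_id (resource_id : String) (out : String) : Prop := out = normalize_resource_id_alt resource_id
instance (resource_id : String) (out : String) : Decidable (Spec_normalize_resource_id resource_id out) := by unfold Spec_normalize_resource_id; infer_instance

-- ===== CLAIM (what is proved, stated in full; the proofs are below) =====
def Claim_equal_normalize_resource_id : Prop := ∀ (resource_id : String), Dom_normalize_resource_id resource_id → Spec_normalize_resource_id resource_id (normalize_resource_id resource_id)

-- ===== LEMMAS AND PROOFS =====

lemma a_unfold (s : String) (hs : ¬ s = "") :
    normalize_resource_id s =
      String.mk (PySem.Chars.join ['/']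
        ((PySem.List.enumerate (PySem.Chars.splitOn s.toList ['/'])).map (fun p => pvSegA p.1 p.2))) := by
  rw [normalize_resource_id, if_neg hs]
  have hf := PySem.List.foldl_append_singleton_eq_map (fun p : Int × List Char => pvSegA p.1 p.2)
    (PySem.List.enumerate (PySem.Chars.splitOn s.toList ['/'])) []
  rw [List.nil_append] at hf
  conv_rhs => rw [← hf]

lemma alt_unfold (s : String) (hs : ¬ s = "") :
    normalize_resource_id_alt s =
      String.mk (PySem.Chars.join ['/']
        (List.zipWith (fun f seg => f seg) pvHeadFixers (PySem.Chars.splitOn s.toList ['/']) ++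
          pvPairs ((PySem.Chars.splitOn s.toList ['/']).drop 7))) := by
  rw [normalize_resource_id_alt, if_neg hs]
  have hD : PySem.List.slice (PySem.Chars.splitOn s.toList ['/']) (some 7)
      = List.drop 7 (PySem.Chars.splitOn s.toList ['/']) := by
    rw [PySem.List.slice_from _ (by norm_num)]; rfl
  conv_rhs => rw [← hD]

-- A's capitalization loop over range(1, len) is 'keep the first part, capitalize the rest'
lemma fold_cap (rest pre : List (List Char)) :
    (PySem.List.pyRange pre.length (pre.length + rest.length) 1).foldl
      (fun ps j => if PySem.List.pyGetD ps j [] ≠ [] then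
          ps.set j.toNat (pvCapFirst (PySem.List.pyGetD ps j [])) else ps) (pre ++ rest)
    = pre ++ rest.map (fun p => if p = [] then p else pvCapFirst p) := by
  induction rest generalizing pre with
  | nil =>
    have hr : PySem.List.pyRange (↑pre.length) (↑pre.length + ↑([] : List (List Char)).length) 1 = [] :=
      List.eq_nil_iff_forall_not_mem.mpr (fun x hx => by
        rw [PySem.List.mem_pyRange_one] at hx
        simp only [List.length_nil, Nat.cast_zero] at hx; omega)
    rw [hr]; simp
  | cons r rs ih =>
    have hcons : PySem.List.pyRange (↑pre.length) (↑pre.length + ↑(r :: rs).length) 1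
        = ↑pre.length :: PySem.List.pyRange (↑pre.length + 1) (↑pre.length + ↑(r :: rs).length) 1 := by
      exact PySem.List.pyRange_one_cons (by simp only [List.length_cons]; push_cast; omega)
    rw [hcons, List.foldl_cons]
    have hget : PySem.List.pyGetD (pre ++ r :: rs) (↑pre.length) [] = r := by
      rw [PySem.List.pyGetD_natCast]
      simp
    have hstep : (if PySem.List.pyGetD (pre ++ r :: rs) (↑pre.length) [] ≠ [] then
          (pre ++ r :: rs).set (↑pre.length : Int).toNat
            (pvCapFirst (PySem.List.pyGetD (pre ++ r :: rs) (↑pre.length) []))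
        else pre ++ r :: rs)
        = (pre ++ [if r = [] then r else pvCapFirst r]) ++ rs := by
      rw [hget]
      by_cases hr0 : r = []
      · simp [hr0]
      · rw [if_pos hr0, if_neg hr0, Int.toNat_natCast]
        simp [List.set_append_right, List.append_assoc]
    rw [hstep]
    have hb : (↑pre.length + ↑(r :: rs).length : Int)
        = ↑(pre ++ [if r = [] then r else pvCapFirst r]).length + ↑rs.length := by
      simp; omega
    have hb1 : (↑pre.length + 1 : Int) = (↑(pre ++ [if r = [] then r else pvCapFirst r]).length : Int) := by
      simp
    rw [hb1, hb, ih]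
    simp

-- A's i = 6 provider branch equals B's helper, on any segment
lemma provA_eq (g : List Char) :
    (let parts := PySem.Chars.splitOn g ['.']
     if 2 ≤ parts.length then
       let parts := parts.set 0 ("Microsoft".toList)
       if PySem.Chars.lower (PySem.List.pyGetD parts 1 []) = "managedidentity".toList then
         PySem.Chars.join ['.'] (parts.set 1 ("ManagedIdentity".toList))
       else
         PySem.Chars.join ['.'] ((PySem.List.pyRange 1 parts.length 1).foldl
           (fun ps j => if PySem.List.pyGetD ps j [] ≠ [] then
               ps.set j.toNat (pvCapFirst (PySem.List.pyGetD ps j [])) else ps) parts)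
     else g)
    = pvProviderB g := by
  rcases hp : PySem.Chars.splitOn g ['.'] with - | ⟨p0, - | ⟨p1, rest⟩⟩
  · simp [pvProviderB, hp]
  · simp [pvProviderB, hp]
  · rw [pvProviderB]
    simp only [hp]
    have hget1A : PySem.List.pyGetD ("Microsoft".toList :: p1 :: rest) 1 [] = p1 := by
      rw [show (1 : Int) = ((1 : Nat) : Int) from rfl, PySem.List.pyGetD_natCast]; rfl
    have hs1 : PySem.List.slice (p0 :: p1 :: rest) (some 1) = p1 :: rest := by
      rw [PySem.List.slice_from _ (by norm_num)]; rfl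
    have hget0B : PySem.List.pyGetD (p1 :: rest) 0 [] = p1 := by
      rw [show (0 : Int) = ((0 : Nat) : Int) from rfl, PySem.List.pyGetD_natCast]; rfl
    have hs1' : PySem.List.slice (p1 :: rest) (some 1) = rest := by
      rw [PySem.List.slice_from _ (by norm_num)]; rfl
    rw [if_pos (show 2 ≤ (p0 :: p1 :: rest).length by simp),
      if_neg (show ¬ (p0 :: p1 :: rest).length < 2 by simp)]
    have hset0 : (p0 :: p1 :: rest).set 0 ("Microsoft".toList) = "Microsoft".toList :: p1 :: rest := rfl
    rw [hset0, hget1A, hs1, hget0B, hs1']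
    by_cases hmi : PySem.Chars.lower p1 = "managedidentity".toList
    · rw [if_pos hmi, if_pos hmi]; rfl
    · rw [if_neg hmi, if_neg hmi]
      have hfc := fold_cap (p1 :: rest) (["Microsoft".toList])
      simp only [List.length_singleton, Nat.cast_one, List.singleton_append] at hfc
      have harg : ((("Microsoft".toList : List Char) :: p1 :: rest).length : Int)
          = 1 + ↑((p1 :: rest).length) := by
        push_cast [List.length_cons]; ring
      rw [harg, hfc]

lemma segA0 (x : List Char) : pvSegA 0 x = x := by simp [pvSegA]
lemma segA2 (x : List Char) : pvSegA 2 x = x := by simp [pvSegA]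
lemma segA4 (x : List Char) : pvSegA 4 x = x := by simp [pvSegA]

lemma segA1 (x : List Char) : pvSegA 1 x = pvKw ("subscriptions".toList) x := by
  rw [pvKw, show PySem.Chars.lower ("subscriptions".toList) = "subscriptions".toList from by decide]
  simp [pvSegA]

lemma segA3 (x : List Char) : pvSegA 3 x = pvKw ("resourceGroups".toList) x := by
  rw [pvKw, show PySem.Chars.lower ("resourceGroups".toList) = "resourcegroups".toList from by decide]
  simp [pvSegA]

lemma segA5 (x : List Char) : pvSegA 5 x = pvKw ("providers".toList) x := by
  rw [pvKw, show PySem.Chars.lower ("providers".toList) = "providers".toList from by decide]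
  simp [pvSegA]

lemma segA6 (x : List Char) : pvSegA 6 x =
    if PySem.Chars.startswith (PySem.Chars.lower x) ("microsoft.".toList) then pvProviderB x else x := by
  rw [pvSegA, if_neg (by norm_num), if_neg (by rintro ⟨h, -⟩; norm_num at h),
    if_neg (by rintro ⟨h, -⟩; norm_num at h), if_neg (by rintro ⟨h, -⟩; norm_num at h)]
  by_cases hms : PySem.Chars.startswith (PySem.Chars.lower x) ("microsoft.".toList) = true
  · rw [if_pos ⟨rfl, hms⟩, if_pos hms]
    exact provA_eq x
  · rw [if_neg (by tauto), if_neg (by rintro ⟨h, -⟩; omega), if_neg hms]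

-- A's first ≤ 7 loop iterations compute exactly B's zipped function table
lemma head_eq (h : List (List Char)) (hlen : h.length ≤ 7) :
    (PySem.List.enumerate h).map (fun p => pvSegA p.1 p.2)
      = List.zipWith (fun f seg => f seg) pvHeadFixers h := by
  rcases h with - | ⟨a, - | ⟨b, - | ⟨c, - | ⟨d, - | ⟨e, - | ⟨f, - | ⟨g, rest⟩⟩⟩⟩⟩⟩⟩
  · simp [PySem.List.enumerate, pvHeadFixers]
  · simp [PySem.List.enumerate_cons, PySem.List.enumerate_nil, pvHeadFixers, segA0]
  · simp only [PySem.List.enumerate_cons, PySem.List.enumerate_nil, List.map_cons, List.map_nil]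
    norm_num [pvHeadFixers, segA0, segA1]
  · simp only [PySem.List.enumerate_cons, PySem.List.enumerate_nil, List.map_cons, List.map_nil]
    norm_num [pvHeadFixers, segA0, segA1, segA2]
  · simp only [PySem.List.enumerate_cons, PySem.List.enumerate_nil, List.map_cons, List.map_nil]
    norm_num [pvHeadFixers, segA0, segA1, segA2, segA3]
  · simp only [PySem.List.enumerate_cons, PySem.List.enumerate_nil, List.map_cons, List.map_nil]
    norm_num [pvHeadFixers, segA0, segA1, segA2, segA3, segA4]
  · simp only [PySem.List.enumerate_cons, PySem.List.enumerate_nil, List.map_cons, List.map_nil]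
    norm_num [pvHeadFixers, segA0, segA1, segA2, segA3, segA4, segA5]
  · rcases rest with - | ⟨z, zs⟩
    · simp only [PySem.List.enumerate_cons, PySem.List.enumerate_nil, List.map_cons, List.map_nil]
      norm_num [pvHeadFixers, segA0, segA1, segA2, segA3, segA4, segA5, segA6]
    · simp at hlen
      omega

lemma pvSegA_big (i : Int) (x : List Char) (hi : 6 < i) :
    pvSegA i x = if PySem.Int.mod i 2 = 1 then pvRtMap.getD (PySem.Chars.lower x) x else x := by
  rw [pvSegA, if_neg (by omega), if_neg (by rintro ⟨h, -⟩; omega), if_neg (by rintro ⟨h, -⟩; omega),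
    if_neg (by rintro ⟨h, -⟩; omega), if_neg (by rintro ⟨h, -⟩; omega)]
  by_cases hm : PySem.Int.mod i 2 = 1
  · rw [if_pos ⟨hi, hm⟩, if_pos hm]
  · rw [if_neg (by tauto), if_neg hm]

-- A's tail iterations (odd index ↦ table lookup, even ↦ identity) are B's pairwise recursion
lemma tail_eq (t : List (List Char)) : ∀ (k : Int), 6 < k → PySem.Int.mod k 2 = 1 →
    (PySem.List.enumerate t k).map (fun p => pvSegA p.1 p.2) = pvPairs t := by
  induction t using pvPairs.induct with
  | case1 => intro k _ _; simp [PySem.List.enumerate_nil, pvPairs]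
  | case2 x =>
    intro k hk hm
    simp only [PySem.List.enumerate_cons, PySem.List.enumerate_nil, List.map_cons, List.map_nil,
      pvPairs]
    rw [pvSegA_big _ _ hk, if_pos hm]
  | case3 x y rest ih =>
    intro k hk hm
    have hm1 : PySem.Int.mod (k + 1) 2 = 0 := by
      rw [PySem.Int.mod_eq_emod_of_pos (by norm_num : (0:Int) < 2)] at hm ⊢
      omega
    have hm2 : PySem.Int.mod (k + 1 + 1) 2 = 1 := by
      rw [PySem.Int.mod_eq_emod_of_pos (by norm_num : (0:Int) < 2)] at hm ⊢
      omega
    simp only [PySem.List.enumerate_cons, List.map_cons, pvPairs]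
    rw [pvSegA_big _ _ hk, if_pos hm, pvSegA_big _ _ (by omega), if_neg (by rw [hm1]; norm_num),
      ih (k + 1 + 1) (by omega) hm2]

-- ===== VERDICT (by name: the statement is the Claim_ definition above) =====
set_option maxHeartbeats 1000000 in
theorem normalize_resource_id_spec : Claim_equal_normalize_resource_id := by
  intro s _
  unfold Spec_normalize_resource_id
  by_cases hs : s = ""
  · simp [normalize_resource_id, normalize_resource_id_alt, hs]
  · rw [a_unfold s hs, alt_unfold s hs]
    set L := PySem.Chars.splitOn s.toList ['/'] with hL
    have key : (PySem.List.enumerate L).map (fun p => pvSegA p.1 p.2)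
        = List.zipWith (fun f seg => f seg) pvHeadFixers L ++ pvPairs (L.drop 7) := by
      conv_lhs => rw [← List.take_append_drop 7 L]
      rw [PySem.List.enumerate_append, List.map_append,
        head_eq (L.take 7) (by simp only [List.length_take]; omega)]
      rcases Nat.lt_or_ge L.length 7 with hl | hl
      · rw [List.drop_eq_nil_of_le (by omega)]
        simp only [PySem.List.enumerate_nil, List.map_nil, List.append_nil, pvPairs]
        rw [List.take_of_length_le (by omega)]
      · have hlen7 : (L.take 7).length = 7 := by
          simp only [List.length_take]; omega
        rw [hlen7, show ((0:Int) + ((7:Nat):Int)) = (7:Int) from by norm_num,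
          tail_eq (L.drop 7) 7 (by norm_num) (by decide)]
        congr 1
        have hfix : pvHeadFixers.length = 7 := by decide
        conv_rhs => rw [← List.take_append_drop 7 L, show pvHeadFixers = pvHeadFixers ++ [] from by simp]
        rw [List.zipWith_append (by rw [hfix, hlen7])]
        simp
    rw [key]
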